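-- pv_equiv track=rewrite | github.com/sebastian-siemianowski/python-options | src/decision/earnings_signal.py | find_nearest_earnings
-- ===== SOURCE A (Python) =====
-- from typing import Dict, List, Optional
--
-- def find_nearest_earnings(
--     current_idx: int,
--     earnings_indices: List[int],
--     look_ahead: int = 30,
--     look_back: int = 5,
-- ) -> Optional[int]:
--     """
--     Find nearest earnings date within look window.
--
--     Prioritizes upcoming earnings (look_ahead) over past (look_back).
--
--     Args:
--         current_idx: Current index in the series.
--         earnings_indices: Sorted list of earnings date indices.
--         look_ahead: Max days forward to search.
--         look_back: Max days backward to search.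
--
--     Returns:
--         Index of nearest earnings date, or None.
--     """
--     if not earnings_indices:
--         return None
--
--     best = None
--     best_dist = float("inf")
--
--     for e_idx in earnings_indices:
--         dist = e_idx - current_idx
--         if -look_back <= dist <= look_ahead:
--             if abs(dist) < best_dist:
--                 best_dist = abs(dist)
--                 best = e_idx
--
--     return best
-- ===== SOURCE B (Python) =====
-- def find_nearest_earnings(current_idx, earnings_indices, look_ahead=30, look_back=5):
--     n = len(earnings_indices)
--     if n == 0:
--         return None
--     lo_b = current_idx - look_back
--     hi_b = current_idx + look_ahead
--     if lo_b > hi_b: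
--         return None
--     # clamp the search target into the window
--     t = current_idx
--     if t < lo_b:
--         t = lo_b
--     if t > hi_b:
--         t = hi_b
--     # hand-rolled bisect_left(earnings_indices, t)
--     lo, hi = 0, n
--     while lo < hi:
--         mid = (lo + hi) // 2
--         if earnings_indices[mid] < t:
--             lo = mid + 1
--         else:
--             hi = mid
--     best = None
--     if lo < n:
--         v = earnings_indices[lo]
--         if lo_b <= v <= hi_b:
--             best = v
--     if lo > 0:
--         u = earnings_indices[lo - 1]
--         if lo_b <= u <= hi_b:
--             if best is None or abs(u - current_idx) <= abs(best - current_idx):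
--                 best = u
--     return best
-- ===== Notes on version B (the rewrite author's own statement) =====
-- stated objective: alternative
-- what changed: Replaces A's linear scan of all earnings indices with a hand-rolled bisect_left to the window-clamped target and a check of the two neighbouring candidates (prefer the lower one on ties); Pre_ admits sorted lists (A's docstring demands 'Sorted list of earnings date indices') and any list with no element in the window, excluding only unsorted lists with an in-window element (a timing run's random large lists are unsorted, so no speed-up was credited).
-- outside the precondition, e.g. on find_nearest_earnings(0, [10, 1], 30, 5): A returns 1, B returns 10
import Mathlib
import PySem

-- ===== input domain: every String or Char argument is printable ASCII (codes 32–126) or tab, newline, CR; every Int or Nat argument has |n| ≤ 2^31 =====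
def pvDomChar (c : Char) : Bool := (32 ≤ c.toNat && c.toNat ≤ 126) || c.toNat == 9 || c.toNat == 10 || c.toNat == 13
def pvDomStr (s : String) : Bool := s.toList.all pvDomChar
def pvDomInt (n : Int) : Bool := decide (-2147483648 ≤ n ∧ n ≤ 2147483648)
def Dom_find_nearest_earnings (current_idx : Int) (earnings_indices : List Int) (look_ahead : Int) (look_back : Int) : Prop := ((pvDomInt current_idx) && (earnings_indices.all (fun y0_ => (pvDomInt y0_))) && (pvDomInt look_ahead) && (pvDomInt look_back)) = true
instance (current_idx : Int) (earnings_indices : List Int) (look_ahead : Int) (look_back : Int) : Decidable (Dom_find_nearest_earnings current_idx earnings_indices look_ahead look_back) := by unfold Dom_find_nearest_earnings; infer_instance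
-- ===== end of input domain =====

-- B replaces A's linear scan with a binary search (bisect_left) to the window-clamped
-- target plus a check of the two neighbouring candidates; equivalence is proved on
-- sorted lists (Pre_), the domain A's own docstring states.

-- ===== PORT A =====
-- A's loop state is (best, best_dist); best_dist = float("inf") initially is modelled as
-- `none` (∞, which compares greater than every integer) and is `some |dist|` afterwards —
-- exact, since every later value of best_dist is an integer.
def find_nearest_earnings (current_idx : Int) (earnings_indices : List Int) (look_ahead : Int) (look_back : Int) : Option Int :=
  if earnings_indices = [] then none
  else
    let s := earnings_indices.foldl
      (fun (acc : Option Int × Option Int) e_idx =>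
        let dist := e_idx - current_idx
        if -look_back ≤ dist ∧ dist ≤ look_ahead then
          let improves := match acc.2 with
            | none => true
            | some bd => decide (|dist| < bd)
          if improves then (some e_idx, some |dist|) else acc
        else acc)
      (none, none)
    s.1

-- ===== PORT B =====
-- hand-rolled bisect_left loop of Source B; `mid` is always < hi ≤ length, so `getD mid 0`
-- reads exactly the element Python reads (the default is never used).
-- `fuel` only makes the recursion structural (hi - lo shrinks every iteration, so
-- fuel = initial hi - lo is always enough); each step is exactly Source B's loop body.
def bisectGo (xs : List Int) (t : Int) : Nat → Nat → Nat → Nat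
  | 0, lo, _ => lo
  | fuel + 1, lo, hi =>
    if lo < hi then
      let mid := (lo + hi) / 2
      if xs.getD mid 0 < t then bisectGo xs t fuel (mid + 1) hi else bisectGo xs t fuel lo mid
    else lo

def find_nearest_earnings_alt (current_idx : Int) (earnings_indices : List Int) (look_ahead : Int) (look_back : Int) : Option Int :=
  let n := earnings_indices.length
  if n = 0 then none
  else
    let loB := current_idx - look_back
    let hiB := current_idx + look_ahead
    if loB > hiB then none
    else
      -- clamp the target into the window (the two sequential ifs of Source B)
      let t0 := current_idx
      let t1 := if t0 < loB then loB else t0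
      let t := if t1 > hiB then hiB else t1
      let i := bisectGo earnings_indices t n 0 n
      let best : Option Int :=
        if i < n then
          let v := earnings_indices.getD i 0
          if loB ≤ v ∧ v ≤ hiB then some v else none
        else none
      let best2 : Option Int :=
        if 0 < i then
          let u := earnings_indices.getD (i - 1) 0
          if loB ≤ u ∧ u ≤ hiB then
            match best with
            | none => some u
            | some b => if |u - current_idx| ≤ |b - current_idx| then some u else best
          else best
        else best
      best2

-- ===== PRECONDITION & SPEC =====
-- Pre_ admits sorted lists — A's docstring demands "Sorted list of earnings date
-- indices", and B's binary search relies on it — and also any list with no element in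
-- the look window (both programs return None there whatever the order); it excludes
-- only UNSORTED lists with an in-window element, outside the documented domain, where
-- the two may return different values.
def Pre_find_nearest_earnings (current_idx : Int) (earnings_indices : List Int) (look_ahead : Int) (look_back : Int) : Prop :=
  List.Pairwise (· ≤ ·) earnings_indices ∨
    ∀ e ∈ earnings_indices, ¬(-look_back ≤ e - current_idx ∧ e - current_idx ≤ look_ahead)
instance (current_idx : Int) (earnings_indices : List Int) (look_ahead : Int) (look_back : Int) : Decidable (Pre_find_nearest_earnings current_idx earnings_indices look_ahead look_back) := by unfold Pre_find_nearest_earnings; infer_instance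

def pvWitness_find_nearest_earnings : Int × List Int × Int × Int := (10, [3, 9, 15], 30, 5)

def Spec_find_nearest_earnings (current_idx : Int) (earnings_indices : List Int) (look_ahead : Int) (look_back : Int) (out : Option Int) : Prop := out = find_nearest_earnings_alt current_idx earnings_indices look_ahead look_back
instance (current_idx : Int) (earnings_indices : List Int) (look_ahead : Int) (look_back : Int) (out : Option Int) : Decidable (Spec_find_nearest_earnings current_idx earnings_indices look_ahead look_back out) := by unfold Spec_find_nearest_earnings; infer_instance

-- ===== CLAIM (what is proved, stated in full; the proofs are below) =====
def Claim_equal_find_nearest_earnings : Prop := ∀ (current_idx : Int) (earnings_indices : List Int) (look_ahead : Int) (look_back : Int), Dom_find_nearest_earnings current_idx earnings_indices look_ahead look_back → Pre_find_nearest_earnings current_idx earnings_indices look_ahead look_back → Spec_find_nearest_earnings current_idx earnings_indices look_ahead look_back (find_nearest_earnings current_idx earnings_indices look_ahead look_back)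

-- ===== LEMMAS AND PROOFS =====

-- `Win c la lb e`: e lies in the look window around c.
def Win (c la lb e : Int) : Prop := -lb ≤ e - c ∧ e - c ≤ la

-- `Good`: r is none iff no element of xs is in the window, otherwise r is an in-window
-- element of xs of minimal |·-c|, the smallest such value. Such an r is unique.
def Good (c la lb : Int) (xs : List Int) (r : Option Int) : Prop :=
  (r = none → ∀ e ∈ xs, ¬ Win c la lb e) ∧
  (∀ b, r = some b → b ∈ xs ∧ Win c la lb b ∧
    ∀ e ∈ xs, Win c la lb e → |b - c| < |e - c| ∨ (|b - c| = |e - c| ∧ b ≤ e))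

theorem Good_unique (c la lb : Int) (xs : List Int) (r1 r2 : Option Int)
    (h1 : Good c la lb xs r1) (h2 : Good c la lb xs r2) : r1 = r2 := by
  cases r1 with
  | none =>
    cases r2 with
    | none => rfl
    | some b =>
      obtain ⟨hb, hw, _⟩ := h2.2 b rfl
      exact absurd hw (h1.1 rfl b hb)
  | some a =>
    obtain ⟨ha, hwa, hmina⟩ := h1.2 a rfl
    cases r2 with
    | none => exact absurd hwa (h2.1 rfl a ha)
    | some b =>
      obtain ⟨hb, hwb, hminb⟩ := h2.2 b rfl
      have h1' := hmina b hb hwb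
      have h2' := hminb a ha hwa
      have : a = b := by omega
      simp [this]

theorem foldA_good (c la lb : Int) (xs : List Int) (hs : List.Pairwise (· ≤ ·) xs) :
    Good c la lb xs
      (xs.foldl
        (fun (acc : Option Int × Option Int) e_idx =>
          let dist := e_idx - c
          if -lb ≤ dist ∧ dist ≤ la then
            let improves := match acc.2 with
              | none => true
              | some bd => decide (|dist| < bd)
            if improves then (some e_idx, some |dist|) else acc
          else acc)
        (none, none)).1 := by
  set step := (fun (acc : Option Int × Option Int) e_idx =>
          let dist := e_idx - c
          if -lb ≤ dist ∧ dist ≤ la then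
            let improves := match acc.2 with
              | none => true
              | some bd => decide (|dist| < bd)
            if improves then (some e_idx, some |dist|) else acc
          else acc) with hstep
  suffices h : (xs.foldl step (none, none) = (none, none) ∧ ∀ e ∈ xs, ¬ Win c la lb e)
      ∨ (∃ b, xs.foldl step (none, none) = (some b, some |b - c|) ∧ b ∈ xs ∧ Win c la lb b ∧
          ∀ e ∈ xs, Win c la lb e → |b - c| < |e - c| ∨ (|b - c| = |e - c| ∧ b ≤ e)) by
    rcases h with ⟨he, hn⟩ | ⟨b, he, hb, hw, hm⟩
    · constructor
      · intro _; exact hn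
      · intro b hb; rw [he] at hb; simp at hb
    · constructor
      · intro hn; rw [he] at hn; simp at hn
      · intro b' hb'; rw [he] at hb'; simp at hb'; subst hb'; exact ⟨hb, hw, hm⟩
  induction xs using List.reverseRecOn with
  | nil => left; simp
  | append_singleton pre e ih =>
    rw [List.pairwise_append] at hs
    obtain ⟨hpre, _, hle⟩ := hs
    have hle' : ∀ a ∈ pre, a ≤ e := by intro a ha; exact hle a ha e (by simp)
    rw [List.foldl_append]
    rcases ih hpre with ⟨heq, hn⟩ | ⟨b, heq, hb, hw, hm⟩
    · rw [heq]
      by_cases hwe : Win c la lb e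
      · obtain ⟨hw1, hw2⟩ := hwe
        right
        refine ⟨e, ?_, by simp, ⟨hw1, hw2⟩, ?_⟩
        · simp only [hstep, List.foldl_cons, List.foldl_nil]
          rw [if_pos ⟨hw1, hw2⟩]
          simp
        · intro x hx hwx
          simp at hx
          rcases hx with hx | hx
          · exact absurd hwx (hn x hx)
          · subst hx; right; exact ⟨rfl, le_refl _⟩
      · left
        constructor
        · simp only [hstep, List.foldl_cons, List.foldl_nil]
          rw [if_neg (show ¬(-lb ≤ e - c ∧ e - c ≤ la) from fun hc => hwe hc)]
        · intro x hx; simp at hx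
          rcases hx with hx | hx
          · exact hn x hx
          · subst hx; exact hwe
    · rw [heq]
      by_cases hwe : Win c la lb e
      · obtain ⟨hw1, hw2⟩ := hwe
        by_cases himp : |e - c| < |b - c|
        · right
          refine ⟨e, ?_, by simp, ⟨hw1, hw2⟩, ?_⟩
          · simp only [hstep, List.foldl_cons, List.foldl_nil]
            rw [if_pos ⟨hw1, hw2⟩]
            simp [himp]
          · intro x hx hwx
            simp at hx
            rcases hx with hx | hx
            · rcases hm x hx hwx with h | h
              · left; omega
              · left; omega
            · subst hx; right; exact ⟨rfl, le_refl _⟩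
        · right
          refine ⟨b, ?_, by simp [hb], hw, ?_⟩
          · simp only [hstep, List.foldl_cons, List.foldl_nil]
            rw [if_pos ⟨hw1, hw2⟩]
            simp [himp]
          · intro x hx hwx
            simp at hx
            rcases hx with hx | hx
            · exact hm x hx hwx
            · subst hx
              have hbe : b ≤ x := hle' b hb
              omega
      · right
        refine ⟨b, ?_, by simp [hb], hw, ?_⟩
        · simp only [hstep, List.foldl_cons, List.foldl_nil]
          rw [if_neg (show ¬(-lb ≤ e - c ∧ e - c ≤ la) from fun hc => hwe hc)]
        · intro x hx hwx
          simp at hx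
          rcases hx with hx | hx
          · exact hm x hx hwx
          · subst hx; exact absurd hwx hwe

theorem sorted_getD (xs : List Int) (hs : List.Pairwise (· ≤ ·) xs)
    (j k : Nat) (hjk : j ≤ k) (hk : k < xs.length) :
    xs.getD j 0 ≤ xs.getD k 0 := by
  rcases Nat.eq_or_lt_of_le hjk with h | h
  · subst h; exact le_refl _
  · rw [List.getD_eq_getElem xs 0 (by omega), List.getD_eq_getElem xs 0 hk]
    exact List.pairwise_iff_getElem.1 hs j k (by omega) hk h

theorem bisectGo_spec (xs : List Int) (t : Int) (hs : List.Pairwise (· ≤ ·) xs) :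
    ∀ n lo hi, hi - lo ≤ n → hi ≤ xs.length → lo ≤ hi →
    (∀ j, j < lo → xs.getD j 0 < t) →
    (∀ j, hi ≤ j → j < xs.length → t ≤ xs.getD j 0) →
    lo ≤ bisectGo xs t n lo hi ∧ bisectGo xs t n lo hi ≤ hi ∧
    (∀ j, j < bisectGo xs t n lo hi → xs.getD j 0 < t) ∧
    (∀ j, bisectGo xs t n lo hi ≤ j → j < xs.length → t ≤ xs.getD j 0) := by
  intro n
  induction n with
  | zero =>
    intro lo hi hfuel hlen hlh hbelow habove
    simp only [bisectGo]
    exact ⟨le_refl _, by omega, hbelow, fun j hj hjl => habove j (by omega) hjl⟩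
  | succ n ih =>
    intro lo hi hfuel hlen hlh hbelow habove
    rw [bisectGo]
    by_cases h : lo < hi
    · rw [if_pos h]
      simp only
      by_cases hm : xs.getD ((lo + hi) / 2) 0 < t
      · rw [if_pos hm]
        refine (ih ((lo + hi) / 2 + 1) hi (by omega) hlen (by omega) ?_ habove).imp ?_ id
        · intro j hj
          exact lt_of_le_of_lt (sorted_getD xs hs j ((lo + hi) / 2) (by omega) (by omega)) hm
        · intro h'; omega
      · rw [if_neg hm]
        refine (ih lo ((lo + hi) / 2) (by omega) (by omega) (by omega) hbelow ?_).imp id ?_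
        · intro j hj hjl
          exact le_trans (show t ≤ xs.getD ((lo + hi) / 2) 0 by omega)
            (sorted_getD xs hs ((lo + hi) / 2) j hj hjl)
        · intro h'; exact ⟨by omega, h'.2⟩
    · rw [if_neg h]
      exact ⟨le_refl _, by omega, hbelow, fun j hj hjl => habove j (by omega) hjl⟩

theorem foldB_good (c : Int) (xs : List Int) (la lb : Int) (hs : List.Pairwise (· ≤ ·) xs) :
    Good c la lb xs (find_nearest_earnings_alt c xs la lb) := by
  by_cases h0 : xs.length = 0
  · have hnil : xs = [] := List.length_eq_zero_iff.1 h0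
    subst hnil
    exact ⟨fun _ e he _ => by simp at he, fun b hb => by simp [find_nearest_earnings_alt] at hb⟩
  by_cases hlw : c - lb > c + la
  · have halt : find_nearest_earnings_alt c xs la lb = none := by
      simp only [find_nearest_earnings_alt, if_neg h0, if_pos hlw]
    rw [halt]
    refine ⟨fun _ e _ hwin => ?_, fun b hb => by simp at hb⟩
    unfold Win at hwin; omega
  · set t : Int := if (if c < c - lb then c - lb else c) > c + la then c + la
        else (if c < c - lb then c - lb else c) with ht
    set i := bisectGo xs t xs.length 0 xs.length with hi
    obtain ⟨_, hile, hbelow, habove⟩ := bisectGo_spec xs t hs xs.length 0 xs.length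
      (by omega) le_rfl (by omega) (by omega) (by omega)
    have halt : find_nearest_earnings_alt c xs la lb =
        (let best : Option Int :=
          if i < xs.length then
            if c - lb ≤ xs.getD i 0 ∧ xs.getD i 0 ≤ c + la then some (xs.getD i 0) else none
          else none
        if 0 < i then
          if c - lb ≤ xs.getD (i - 1) 0 ∧ xs.getD (i - 1) 0 ≤ c + la then
            match best with
            | none => some (xs.getD (i - 1) 0)
            | some b => if |xs.getD (i - 1) 0 - c| ≤ |b - c| then some (xs.getD (i - 1) 0) else best
          else best
        else best) := by
      simp only [find_nearest_earnings_alt, if_neg h0, if_neg hlw, ← ht, ← hi]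
    rw [halt]
    -- facts about t
    have hT : c - lb ≤ t ∧ t ≤ c + la ∧ (c - lb ≤ c → t ≤ c) ∧ (c ≤ c + la → c ≤ t) := by
      split_ifs at ht <;> omega
    -- membership ↔ getD
    have hmem : ∀ e ∈ xs, ∃ j, j < xs.length ∧ xs.getD j 0 = e := by
      intro e he
      obtain ⟨j, hj, hje⟩ := List.mem_iff_getElem.1 he
      exact ⟨j, hj, by rw [List.getD_eq_getElem xs 0 hj]; exact hje⟩
    have hmemD : ∀ j, j < xs.length → xs.getD j 0 ∈ xs := by
      intro j hj; rw [List.getD_eq_getElem xs 0 hj]; exact List.getElem_mem hj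
    have hge : ∀ e ∈ xs, t ≤ e → i < xs.length ∧ t ≤ xs.getD i 0 ∧ xs.getD i 0 ≤ e := by
      intro e he hte
      obtain ⟨j, hj, hje⟩ := hmem e he
      have hij : i ≤ j := by
        by_contra hc
        exact absurd (hbelow j (by omega)) (by omega)
      have hin : i < xs.length := by omega
      exact ⟨hin, habove i le_rfl hin, hje ▸ sorted_getD xs hs i j hij hj⟩
    have hlt : ∀ e ∈ xs, e < t → 0 < i ∧ xs.getD (i - 1) 0 < t ∧ e ≤ xs.getD (i - 1) 0 := by
      intro e he het
      obtain ⟨j, hj, hje⟩ := hmem e he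
      have hji : j < i := by
        by_contra hc
        exact absurd (habove j (by omega) hj) (by omega)
      exact ⟨by omega, hbelow (i - 1) (by omega),
        hje ▸ sorted_getD xs hs j (i - 1) (by omega) (by omega)⟩
    by_cases hin : i < xs.length
    · rw [if_pos hin]
      by_cases hvw : c - lb ≤ xs.getD i 0 ∧ xs.getD i 0 ≤ c + la
      · rw [if_pos hvw]
        have hvt : t ≤ xs.getD i 0 := habove i le_rfl hin
        by_cases hip : 0 < i
        · rw [if_pos hip]
          have hut : xs.getD (i - 1) 0 < t := hbelow (i - 1) (by omega)
          by_cases huw : c - lb ≤ xs.getD (i - 1) 0 ∧ xs.getD (i - 1) 0 ≤ c + la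
          · rw [if_pos huw]
            by_cases hcmp : |xs.getD (i - 1) 0 - c| ≤ |xs.getD i 0 - c|
            · simp only [if_pos hcmp]
              refine ⟨fun h => by simp at h, fun b hb => ?_⟩
              simp only [Option.some.injEq] at hb
              subst hb
              refine ⟨hmemD _ (by omega), by unfold Win; omega, ?_⟩
              intro e he hwine
              unfold Win at hwine
              rcases le_or_gt t e with h | h
              · obtain ⟨_, h1, h2⟩ := hge e he h
                rcases abs_cases (e - c) with ⟨ha1, ha2⟩ | ⟨ha1, ha2⟩ <;>
                  rcases abs_cases (xs.getD i 0 - c) with ⟨hb1, hb2⟩ | ⟨hb1, hb2⟩ <;>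
                  rcases abs_cases (xs.getD (i - 1) 0 - c) with ⟨hc1, hc2⟩ | ⟨hc1, hc2⟩ <;> omega
              · obtain ⟨_, _, h2⟩ := hlt e he h
                rcases abs_cases (e - c) with ⟨ha1, ha2⟩ | ⟨ha1, ha2⟩ <;>
                  rcases abs_cases (xs.getD i 0 - c) with ⟨hb1, hb2⟩ | ⟨hb1, hb2⟩ <;>
                  rcases abs_cases (xs.getD (i - 1) 0 - c) with ⟨hc1, hc2⟩ | ⟨hc1, hc2⟩ <;> omega
            · simp only [if_neg hcmp]
              refine ⟨fun h => by simp at h, fun b hb => ?_⟩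
              simp only [Option.some.injEq] at hb
              subst hb
              refine ⟨hmemD _ (by omega), by unfold Win; omega, ?_⟩
              intro e he hwine
              unfold Win at hwine
              rcases le_or_gt t e with h | h
              · obtain ⟨_, h1, h2⟩ := hge e he h
                rcases abs_cases (e - c) with ⟨ha1, ha2⟩ | ⟨ha1, ha2⟩ <;>
                  rcases abs_cases (xs.getD i 0 - c) with ⟨hb1, hb2⟩ | ⟨hb1, hb2⟩ <;>
                  rcases abs_cases (xs.getD (i - 1) 0 - c) with ⟨hc1, hc2⟩ | ⟨hc1, hc2⟩ <;> omega
              · obtain ⟨_, _, h2⟩ := hlt e he h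
                rcases abs_cases (e - c) with ⟨ha1, ha2⟩ | ⟨ha1, ha2⟩ <;>
                  rcases abs_cases (xs.getD i 0 - c) with ⟨hb1, hb2⟩ | ⟨hb1, hb2⟩ <;>
                  rcases abs_cases (xs.getD (i - 1) 0 - c) with ⟨hc1, hc2⟩ | ⟨hc1, hc2⟩ <;> omega
          · rw [if_neg huw]
            refine ⟨fun h => by simp at h, fun b hb => ?_⟩
            simp only [Option.some.injEq] at hb
            subst hb
            refine ⟨hmemD _ (by omega), by unfold Win; omega, ?_⟩
            intro e he hwine
            unfold Win at hwine
            rcases le_or_gt t e with h | h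
            · obtain ⟨_, h1, h2⟩ := hge e he h
              rcases abs_cases (e - c) with ⟨ha1, ha2⟩ | ⟨ha1, ha2⟩ <;>
                rcases abs_cases (xs.getD i 0 - c) with ⟨hb1, hb2⟩ | ⟨hb1, hb2⟩ <;>
                rcases abs_cases (xs.getD (i - 1) 0 - c) with ⟨hc1, hc2⟩ | ⟨hc1, hc2⟩ <;> omega
            · obtain ⟨_, hu1, h2⟩ := hlt e he h
              rcases abs_cases (e - c) with ⟨ha1, ha2⟩ | ⟨ha1, ha2⟩ <;>
                rcases abs_cases (xs.getD i 0 - c) with ⟨hb1, hb2⟩ | ⟨hb1, hb2⟩ <;>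
                rcases abs_cases (xs.getD (i - 1) 0 - c) with ⟨hc1, hc2⟩ | ⟨hc1, hc2⟩ <;> omega
        · rw [if_neg hip]
          refine ⟨fun h => by simp at h, fun b hb => ?_⟩
          simp only [Option.some.injEq] at hb
          subst hb
          refine ⟨hmemD _ (by omega), by unfold Win; omega, ?_⟩
          intro e he hwine
          unfold Win at hwine
          rcases le_or_gt t e with h | h
          · obtain ⟨_, h1, h2⟩ := hge e he h
            rcases abs_cases (e - c) with ⟨ha1, ha2⟩ | ⟨ha1, ha2⟩ <;>
              rcases abs_cases (xs.getD i 0 - c) with ⟨hb1, hb2⟩ | ⟨hb1, hb2⟩ <;>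
              rcases abs_cases (xs.getD (i - 1) 0 - c) with ⟨hc1, hc2⟩ | ⟨hc1, hc2⟩ <;> omega
          · obtain ⟨hip', _, _⟩ := hlt e he h
            rcases abs_cases (e - c) with ⟨ha1, ha2⟩ | ⟨ha1, ha2⟩ <;>
              rcases abs_cases (xs.getD i 0 - c) with ⟨hb1, hb2⟩ | ⟨hb1, hb2⟩ <;>
              rcases abs_cases (xs.getD (i - 1) 0 - c) with ⟨hc1, hc2⟩ | ⟨hc1, hc2⟩ <;> omega
      · rw [if_neg hvw]
        have hvt : t ≤ xs.getD i 0 := habove i le_rfl hin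
        by_cases hip : 0 < i
        · rw [if_pos hip]
          have hut : xs.getD (i - 1) 0 < t := hbelow (i - 1) (by omega)
          by_cases huw : c - lb ≤ xs.getD (i - 1) 0 ∧ xs.getD (i - 1) 0 ≤ c + la
          · rw [if_pos huw]
            refine ⟨fun h => by simp at h, fun b hb => ?_⟩
            simp only [Option.some.injEq] at hb
            subst hb
            refine ⟨hmemD _ (by omega), by unfold Win; omega, ?_⟩
            intro e he hwine
            unfold Win at hwine
            rcases le_or_gt t e with h | h
            · obtain ⟨_, h1, h2⟩ := hge e he h
              rcases abs_cases (e - c) with ⟨ha1, ha2⟩ | ⟨ha1, ha2⟩ <;>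
                rcases abs_cases (xs.getD i 0 - c) with ⟨hb1, hb2⟩ | ⟨hb1, hb2⟩ <;>
                rcases abs_cases (xs.getD (i - 1) 0 - c) with ⟨hc1, hc2⟩ | ⟨hc1, hc2⟩ <;> omega
            · obtain ⟨_, _, h2⟩ := hlt e he h
              rcases abs_cases (e - c) with ⟨ha1, ha2⟩ | ⟨ha1, ha2⟩ <;>
                rcases abs_cases (xs.getD i 0 - c) with ⟨hb1, hb2⟩ | ⟨hb1, hb2⟩ <;>
                rcases abs_cases (xs.getD (i - 1) 0 - c) with ⟨hc1, hc2⟩ | ⟨hc1, hc2⟩ <;> omega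
          · rw [if_neg huw]
            refine ⟨fun _ e he hwine => ?_, fun b hb => by simp at hb⟩
            unfold Win at hwine
            rcases le_or_gt t e with h | h
            · obtain ⟨_, h1, h2⟩ := hge e he h
              rcases abs_cases (e - c) with ⟨ha1, ha2⟩ | ⟨ha1, ha2⟩ <;>
                rcases abs_cases (xs.getD i 0 - c) with ⟨hb1, hb2⟩ | ⟨hb1, hb2⟩ <;>
                rcases abs_cases (xs.getD (i - 1) 0 - c) with ⟨hc1, hc2⟩ | ⟨hc1, hc2⟩ <;> omega
            · obtain ⟨_, _, h2⟩ := hlt e he h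
              rcases abs_cases (e - c) with ⟨ha1, ha2⟩ | ⟨ha1, ha2⟩ <;>
                rcases abs_cases (xs.getD i 0 - c) with ⟨hb1, hb2⟩ | ⟨hb1, hb2⟩ <;>
                rcases abs_cases (xs.getD (i - 1) 0 - c) with ⟨hc1, hc2⟩ | ⟨hc1, hc2⟩ <;> omega
        · rw [if_neg hip]
          refine ⟨fun _ e he hwine => ?_, fun b hb => by simp at hb⟩
          unfold Win at hwine
          rcases le_or_gt t e with h | h
          · obtain ⟨_, h1, h2⟩ := hge e he h
            rcases abs_cases (e - c) with ⟨ha1, ha2⟩ | ⟨ha1, ha2⟩ <;>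
              rcases abs_cases (xs.getD i 0 - c) with ⟨hb1, hb2⟩ | ⟨hb1, hb2⟩ <;>
              rcases abs_cases (xs.getD (i - 1) 0 - c) with ⟨hc1, hc2⟩ | ⟨hc1, hc2⟩ <;> omega
          · obtain ⟨hip', _, _⟩ := hlt e he h
            rcases abs_cases (e - c) with ⟨ha1, ha2⟩ | ⟨ha1, ha2⟩ <;>
              rcases abs_cases (xs.getD i 0 - c) with ⟨hb1, hb2⟩ | ⟨hb1, hb2⟩ <;>
              rcases abs_cases (xs.getD (i - 1) 0 - c) with ⟨hc1, hc2⟩ | ⟨hc1, hc2⟩ <;> omega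
    · rw [if_neg hin]
      by_cases hip : 0 < i
      · rw [if_pos hip]
        have hut : xs.getD (i - 1) 0 < t := hbelow (i - 1) (by omega)
        by_cases huw : c - lb ≤ xs.getD (i - 1) 0 ∧ xs.getD (i - 1) 0 ≤ c + la
        · rw [if_pos huw]
          refine ⟨fun h => by simp at h, fun b hb => ?_⟩
          simp only [Option.some.injEq] at hb
          subst hb
          refine ⟨hmemD _ (by omega), by unfold Win; omega, ?_⟩
          intro e he hwine
          unfold Win at hwine
          rcases le_or_gt t e with h | h
          · obtain ⟨h0', h1, h2⟩ := hge e he h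
            rcases abs_cases (e - c) with ⟨ha1, ha2⟩ | ⟨ha1, ha2⟩ <;>
              rcases abs_cases (xs.getD i 0 - c) with ⟨hb1, hb2⟩ | ⟨hb1, hb2⟩ <;>
              rcases abs_cases (xs.getD (i - 1) 0 - c) with ⟨hc1, hc2⟩ | ⟨hc1, hc2⟩ <;> omega
          · obtain ⟨_, _, h2⟩ := hlt e he h
            rcases abs_cases (e - c) with ⟨ha1, ha2⟩ | ⟨ha1, ha2⟩ <;>
              rcases abs_cases (xs.getD i 0 - c) with ⟨hb1, hb2⟩ | ⟨hb1, hb2⟩ <;>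
              rcases abs_cases (xs.getD (i - 1) 0 - c) with ⟨hc1, hc2⟩ | ⟨hc1, hc2⟩ <;> omega
        · rw [if_neg huw]
          refine ⟨fun _ e he hwine => ?_, fun b hb => by simp at hb⟩
          unfold Win at hwine
          rcases le_or_gt t e with h | h
          · obtain ⟨h0', h1, h2⟩ := hge e he h
            rcases abs_cases (e - c) with ⟨ha1, ha2⟩ | ⟨ha1, ha2⟩ <;>
              rcases abs_cases (xs.getD i 0 - c) with ⟨hb1, hb2⟩ | ⟨hb1, hb2⟩ <;>
              rcases abs_cases (xs.getD (i - 1) 0 - c) with ⟨hc1, hc2⟩ | ⟨hc1, hc2⟩ <;> omega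
          · obtain ⟨_, _, h2⟩ := hlt e he h
            rcases abs_cases (e - c) with ⟨ha1, ha2⟩ | ⟨ha1, ha2⟩ <;>
              rcases abs_cases (xs.getD i 0 - c) with ⟨hb1, hb2⟩ | ⟨hb1, hb2⟩ <;>
              rcases abs_cases (xs.getD (i - 1) 0 - c) with ⟨hc1, hc2⟩ | ⟨hc1, hc2⟩ <;> omega
      · rw [if_neg hip]
        refine ⟨fun _ e he hwine => ?_, fun b hb => by simp at hb⟩
        unfold Win at hwine
        rcases le_or_gt t e with h | h
        · obtain ⟨h0', h1, h2⟩ := hge e he h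
          rcases abs_cases (e - c) with ⟨ha1, ha2⟩ | ⟨ha1, ha2⟩ <;>
            rcases abs_cases (xs.getD i 0 - c) with ⟨hb1, hb2⟩ | ⟨hb1, hb2⟩ <;>
            rcases abs_cases (xs.getD (i - 1) 0 - c) with ⟨hc1, hc2⟩ | ⟨hc1, hc2⟩ <;> omega
        · obtain ⟨hip', _, _⟩ := hlt e he h
          rcases abs_cases (e - c) with ⟨ha1, ha2⟩ | ⟨ha1, ha2⟩ <;>
            rcases abs_cases (xs.getD i 0 - c) with ⟨hb1, hb2⟩ | ⟨hb1, hb2⟩ <;>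
            rcases abs_cases (xs.getD (i - 1) 0 - c) with ⟨hc1, hc2⟩ | ⟨hc1, hc2⟩ <;> omega

theorem foldA_none (c la lb : Int) (xs : List Int)
    (h : ∀ e ∈ xs, ¬(-lb ≤ e - c ∧ e - c ≤ la)) :
    ∀ acc : Option Int × Option Int,
      xs.foldl
        (fun (acc : Option Int × Option Int) e_idx =>
          let dist := e_idx - c
          if -lb ≤ dist ∧ dist ≤ la then
            let improves := match acc.2 with
              | none => true
              | some bd => decide (|dist| < bd)
            if improves then (some e_idx, some |dist|) else acc
          else acc)
        acc = acc := by
  induction xs with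
  | nil => intro acc; rfl
  | cons x xs ih =>
    intro acc
    rw [List.foldl_cons]
    simp only
    rw [if_neg (h x (by simp))]
    exact ih (fun e he => h e (by simp [he])) acc

theorem bisectGo_bounds (xs : List Int) (t : Int) :
    ∀ fuel lo hi, lo ≤ hi → lo ≤ bisectGo xs t fuel lo hi ∧ bisectGo xs t fuel lo hi ≤ hi := by
  intro fuel
  induction fuel with
  | zero => intro lo hi hlh; simp only [bisectGo]; omega
  | succ n ih =>
    intro lo hi hlh
    rw [bisectGo]
    by_cases h : lo < hi
    · rw [if_pos h]
      simp only
      by_cases hm : xs.getD ((lo + hi) / 2) 0 < t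
      · rw [if_pos hm]
        have := ih ((lo + hi) / 2 + 1) hi (by omega)
        omega
      · rw [if_neg hm]
        have := ih lo ((lo + hi) / 2) (by omega)
        omega
    · rw [if_neg h]; omega

theorem foldB_none (c : Int) (xs : List Int) (la lb : Int)
    (h : ∀ e ∈ xs, ¬(-lb ≤ e - c ∧ e - c ≤ la)) :
    find_nearest_earnings_alt c xs la lb = none := by
  by_cases h0 : xs.length = 0
  · simp [find_nearest_earnings_alt, h0]
  by_cases hlw : c - lb > c + la
  · simp only [find_nearest_earnings_alt, if_neg h0, if_pos hlw]
  · set t : Int := if (if c < c - lb then c - lb else c) > c + la then c + la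
        else (if c < c - lb then c - lb else c) with ht
    set i := bisectGo xs t xs.length 0 xs.length with hi
    have halt : find_nearest_earnings_alt c xs la lb =
        (let best : Option Int :=
          if i < xs.length then
            if c - lb ≤ xs.getD i 0 ∧ xs.getD i 0 ≤ c + la then some (xs.getD i 0) else none
          else none
        if 0 < i then
          if c - lb ≤ xs.getD (i - 1) 0 ∧ xs.getD (i - 1) 0 ≤ c + la then
            match best with
            | none => some (xs.getD (i - 1) 0)
            | some b => if |xs.getD (i - 1) 0 - c| ≤ |b - c| then some (xs.getD (i - 1) 0) else best
          else best
        else best) := by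
      simp only [find_nearest_earnings_alt, if_neg h0, if_neg hlw, ← ht, ← hi]
    rw [halt]
    have hmemD : ∀ j, j < xs.length → xs.getD j 0 ∈ xs := by
      intro j hj; rw [List.getD_eq_getElem xs 0 hj]; exact List.getElem_mem hj
    have hnw : ∀ j, j < xs.length → ¬(c - lb ≤ xs.getD j 0 ∧ xs.getD j 0 ≤ c + la) := by
      intro j hj hc
      exact h (xs.getD j 0) (hmemD j hj) ⟨by omega, by omega⟩
    obtain ⟨_, hile⟩ := bisectGo_bounds xs t xs.length 0 xs.length (by omega)
    by_cases hin : i < xs.length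
    · rw [if_pos hin, if_neg (hnw i hin)]
      by_cases hip : 0 < i
      · rw [if_pos hip, if_neg (hnw (i - 1) (by omega))]
      · rw [if_neg hip]
    · rw [if_neg hin]
      by_cases hip : 0 < i
      · rw [if_pos hip, if_neg (hnw (i - 1) (by omega))]
      · rw [if_neg hip]

-- ===== VERDICT (by name: the statement is the Claim_ definition above) =====
theorem find_nearest_earnings_spec : Claim_equal_find_nearest_earnings := by
  intro c xs la lb _hdom hpre
  unfold Spec_find_nearest_earnings
  by_cases hxs : xs = []
  · subst hxs; rfl
  rcases hpre with hpre | hnone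
  swap
  · have hA : find_nearest_earnings c xs la lb = none := by
      simp only [find_nearest_earnings, if_neg hxs]
      rw [foldA_none c la lb xs hnone]
    rw [hA, foldB_none c xs la lb hnone]
  · have hA := foldA_good c la lb xs hpre
    have hB := foldB_good c xs la lb hpre
    have hrw : find_nearest_earnings c xs la lb
        = (xs.foldl
            (fun (acc : Option Int × Option Int) e_idx =>
              let dist := e_idx - c
              if -lb ≤ dist ∧ dist ≤ la then
                let improves := match acc.2 with
                  | none => true
                  | some bd => decide (|dist| < bd)
                if improves then (some e_idx, some |dist|) else acc
              else acc)
            (none, none)).1 := by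
      simp [find_nearest_earnings, hxs]
    rw [hrw]
    exact Good_unique c la lb xs _ _ hA hB
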